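-- pv_equiv track=rewrite | github.com/nasuf/Companion_server | app/services/chat/prompt_builder.py | _build_graph_context_section
-- ===== SOURCE A (Python) =====
-- def _section(title: str, body: str) -> str:
--     """Return a clearly-labelled prompt section."""
--     return f"## {title}\n{body}"
--
-- def _build_graph_context_section(graph_context: dict | None) -> str | None:
--     """Build the graph/relationship context section."""
--     if not graph_context:
--         return None
--
--     lines: list[str] = []
--
--     topics = graph_context.get("topics")
--     if topics:
--         lines.append("用户感兴趣的话题：")
--         for t in topics:
--             lines.append(f"  - {t}")
--
--     entities = graph_context.get("entities")
--     if entities: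
--         if lines:
--             lines.append("")
--         lines.append("用户经常提到的：")
--         for e in entities:
--             lines.append(f"  - {e}")
--
--     categories = graph_context.get("categories")
--     if categories:
--         if lines:
--             lines.append("")
--         lines.append("高频记忆分类：")
--         for category in categories:
--             lines.append(f"  - {category}")
--
--     if not lines:
--         return None
--
--     return _section("关系上下文", "\n".join(lines))
-- ===== SOURCE B (Python) =====
-- def _section(title: str, body: str) -> str:
--     """Return a clearly-labelled prompt section."""
--     return f"## {title}\n{body}"
--
-- def _render(specs, d):
--     """Recursively build the body back-to-front, one block per present key."""
--     if not specs:
--         return None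
--     key, header = specs[0]
--     rest = _render(specs[1:], d)
--     items = d.get(key)
--     if not items:
--         return rest
--     block = header + "".join(f"\n  - {x}" for x in items)
--     return block if rest is None else block + "\n\n" + rest
--
-- def _build_graph_context_section(graph_context: dict | None) -> str | None:
--     """Build the graph/relationship context section."""
--     if not graph_context:
--         return None
--     body = _render(
--         [("topics", "用户感兴趣的话题："),
--          ("entities", "用户经常提到的："),
--          ("categories", "高频记忆分类：")],
--         graph_context,
--     )
--     return None if body is None else _section("关系上下文", body)
-- ===== Notes on version B (the rewrite author's own statement) =====
-- stated objective: alternative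
-- what changed: Replaces the three sequential branches that append to a shared `lines` list with manual blank-line bookkeeping by a recursive helper that builds the body string back-to-front: each block is a single string (header plus '\n - item' fragments joined directly) and blocks are combined with an explicit '\n\n' only when a later block already exists, so no line list and no sentinel empty line are ever materialised.
import Mathlib
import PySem

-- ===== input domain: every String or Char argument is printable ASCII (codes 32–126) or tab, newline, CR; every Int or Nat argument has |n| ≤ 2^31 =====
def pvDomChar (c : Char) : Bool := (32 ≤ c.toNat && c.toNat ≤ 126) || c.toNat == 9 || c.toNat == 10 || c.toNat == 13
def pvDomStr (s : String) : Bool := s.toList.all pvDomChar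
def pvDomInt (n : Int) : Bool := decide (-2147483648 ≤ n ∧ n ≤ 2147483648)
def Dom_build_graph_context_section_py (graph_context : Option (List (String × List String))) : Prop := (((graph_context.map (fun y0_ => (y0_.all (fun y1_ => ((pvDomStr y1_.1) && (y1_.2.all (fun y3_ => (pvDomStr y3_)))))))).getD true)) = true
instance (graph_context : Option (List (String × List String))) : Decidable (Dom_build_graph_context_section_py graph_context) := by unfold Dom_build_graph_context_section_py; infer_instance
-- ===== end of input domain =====

-- B rebuilds the body by a recursive back-to-front helper (one string block per key, joined on demand)
-- instead of A's shared `lines` list with blank-line bookkeeping; same output, proved equal below.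

-- ===== PORT A =====
-- Transliteration of A: sequential branches appending to `lines` (per-item loop = List.map), blank-line separator when `lines` nonempty.
def build_graph_context_section_py (graph_context : Option (List (String × List String))) : Option String :=
  match graph_context with
  | none => none
  | some d =>
    if d = [] then none else
    let lines0 : List String := []
    let topics := (List.lookup "topics" d).getD []
    let lines1 := if topics = [] then lines0 else
      lines0 ++ "用户感兴趣的话题：" :: topics.map (fun t => "  - " ++ t)
    let entities := (List.lookup "entities" d).getD []
    let lines2 := if entities = [] then lines1 else
      (if lines1 = [] then lines1 else lines1 ++ [""]) ++ "用户经常提到的：" :: entities.map (fun e => "  - " ++ e)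
    let categories := (List.lookup "categories" d).getD []
    let lines3 := if categories = [] then lines2 else
      (if lines2 = [] then lines2 else lines2 ++ [""]) ++ "高频记忆分类：" :: categories.map (fun c => "  - " ++ c)
    if lines3 = [] then none else
    some ("## " ++ "关系上下文" ++ "\n" ++ PySem.Str.join "\n" lines3)

-- ===== PORT B =====
-- Transliteration of B: recursive `_render` over the spec list, building the body back-to-front.
def pvRender (specs : List (String × String)) (d : List (String × List String)) : Option String :=
  match specs with
  | [] => none
  | (key, header) :: restSpecs =>
    let rest := pvRender restSpecs d
    let items := (List.lookup key d).getD []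
    if items = [] then rest
    else
      let block := header ++ PySem.Str.join "" (items.map (fun x => "\n  - " ++ x))
      match rest with
      | none => some block
      | some s => some (block ++ "\n\n" ++ s)

def build_graph_context_section_py_alt (graph_context : Option (List (String × List String))) : Option String :=
  match graph_context with
  | none => none
  | some d =>
    if d = [] then none else
    match pvRender [("topics", "用户感兴趣的话题："), ("entities", "用户经常提到的："), ("categories", "高频记忆分类：")] d with
    | none => none
    | some body => some ("## " ++ "关系上下文" ++ "\n" ++ body)

-- ===== PRECONDITION & SPEC =====
def Spec_build_graph_context_section_py (graph_context : Option (List (String × List String))) (out : Option String) : Prop := out = build_graph_context_section_py_alt graph_context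
instance (graph_context : Option (List (String × List String))) (out : Option String) : Decidable (Spec_build_graph_context_section_py graph_context out) := by unfold Spec_build_graph_context_section_py; infer_instance

-- ===== CLAIM (what is proved, stated in full; the proofs are below) =====
def Claim_equal_build_graph_context_section_py : Prop := ∀ (graph_context : Option (List (String × List String))), Dom_build_graph_context_section_py graph_context → Spec_build_graph_context_section_py graph_context (build_graph_context_section_py graph_context)

-- ===== LEMMAS AND PROOFS =====

-- one "\n"-joined block equals its header followed by the ""-join of "\n"-prefixed item lines
lemma join_nl_eq_prefix (h : List Char) (l : List (List Char)) :
    PySem.Chars.join ['\n'] (h :: l) = h ++ PySem.Chars.join [] (l.map (fun x => '\n' :: x)) := by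
  induction l generalizing h with
  | nil => simp [PySem.Chars.join, List.intercalate]
  | cons a t ih =>
      rw [PySem.Chars.join_cons_cons, ih a]
      simp only [List.map_cons, List.append_assoc]
      congr 1
      cases t <;> simp [PySem.Chars.join, List.intercalate]

-- B's "\n  - x" item fragments are, char by char, the '\n'-prefixed "  - x" lines of A
lemma map_item (l : List String) :
    l.map ((fun x => '\n' :: x) ∘ String.toList ∘ fun t => "  - " ++ t)
      = l.map (String.toList ∘ fun x => "\n  - " ++ x) := by
  refine List.map_congr_left fun x _ => ?_
  simp [String.toList_append]

-- the blank "" separator line inside one "\n"-join equals a "\n\n" between the two joined halves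
lemma join_blank (s a b : List Char) (m1 m2 : List (List Char)) :
    PySem.Chars.join s (a :: (m1 ++ [] :: b :: m2))
      = PySem.Chars.join s (a :: m1) ++ s ++ s ++ PySem.Chars.join s (b :: m2) := by
  induction m1 generalizing a with
  | nil => simp [PySem.Chars.join, List.intercalate, List.append_assoc]
  | cons c m1' ih =>
      have h1 : PySem.Chars.join s (a :: (c :: m1' ++ [] :: b :: m2))
          = a ++ s ++ PySem.Chars.join s (c :: (m1' ++ [] :: b :: m2)) := by
        simpa using PySem.Chars.join_cons_cons s a c (m1' ++ [] :: b :: m2)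
      simp only [List.cons_append] at h1 ⊢
      rw [h1, ih c, PySem.Chars.join_cons_cons s a c m1']
      simp [List.append_assoc]

-- ===== VERDICT (by name: the statement is the Claim_ definition above) =====
set_option maxHeartbeats 1000000 in
theorem build_graph_context_section_py_spec : Claim_equal_build_graph_context_section_py := by
  intro gc _hdom
  unfold Spec_build_graph_context_section_py
  match gc with
  | none => rfl
  | some d =>
    simp only [build_graph_context_section_py, build_graph_context_section_py_alt, pvRender]
    by_cases hd : d = []
    · simp [hd]
    · simp only [hd, if_false]
      set ts := (List.lookup "topics" d).getD [] with hts
      set es := (List.lookup "entities" d).getD [] with hes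
      set cs := (List.lookup "categories" d).getD [] with hcs
      by_cases h1 : ts = [] <;> by_cases h2 : es = [] <;> by_cases h3 : cs = [] <;>
        simp only [h1, h2, h3, if_true, if_false, List.nil_append, List.map,
              PySem.Str.join] <;>
      first
        | rfl
        | (rw [if_neg (by simp)]
           refine congrArg some (String.toList_inj.mp ?_)
           simp [join_blank, join_nl_eq_prefix, map_item, String.toList_append,
                 List.append_assoc])
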